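-- pv_equiv track=rewrite | github.com/volcengine/verl | atropos/environments/intern_bootcamp/internbootcamp_lib/internbootcamp/bootcamp/kor_logic_truth_value_modal_propositions/kor_logic_truth_value_modal_propositions.py | _parse_symbolic
-- ===== SOURCE A (Python) =====
-- def _parse_symbolic(expr):
--     modality = None
--     negated = False
--     rest = expr
--
--     while rest.startswith('!'):
--         negated = not negated
--         rest = rest[1:]
--
--     if rest.startswith(('#', '$')):
--         modality = rest[0]
--         rest = rest[1:]
--
--     while rest.startswith('!'):
--         negated = not negated
--         rest = rest[1:]
--
--     return modality, negated, rest
-- ===== SOURCE B (Python) =====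
-- import re
--
-- _PREFIX = re.compile(r'(!*)([#$]?)(!*)(.*)', re.DOTALL)
--
-- def _parse_symbolic(expr):
--     m = _PREFIX.match(expr)
--     negated = (len(m.group(1)) + len(m.group(3))) % 2 == 1
--     return m.group(2) or None, negated, m.group(4)
-- ===== Notes on version B (the rewrite author's own statement) =====
-- stated objective: idiomatic
-- what changed: Replaces the three iterative slice-and-toggle scans with a single declarative regex match of the whole prefix structure, computing the negation parity arithmetically from the two bang-group lengths.
import Mathlib
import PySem

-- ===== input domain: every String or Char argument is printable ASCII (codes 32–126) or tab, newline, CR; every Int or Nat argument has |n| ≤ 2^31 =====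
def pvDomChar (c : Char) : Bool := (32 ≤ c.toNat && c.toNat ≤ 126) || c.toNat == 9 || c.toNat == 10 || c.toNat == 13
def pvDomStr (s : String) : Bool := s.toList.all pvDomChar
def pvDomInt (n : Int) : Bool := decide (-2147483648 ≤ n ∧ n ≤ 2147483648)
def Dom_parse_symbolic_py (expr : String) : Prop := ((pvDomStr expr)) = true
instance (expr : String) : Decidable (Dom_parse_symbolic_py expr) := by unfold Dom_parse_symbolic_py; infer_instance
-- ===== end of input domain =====

-- B replaces A's three iterative slice-and-toggle scans with a single declarative
-- prefix match (the regex (!*)([#$]?)(!*)(.*)), computing negation parity arithmetically.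


-- ===== PORT A =====
-- 'while rest.startswith('!'): negated = not negated; rest = rest[1:]'
def pvBangLoop : Bool → List Char → Bool × List Char
  | neg, c :: rest => if c = '!' then pvBangLoop (!neg) rest else (neg, c :: rest)
  | neg, [] => (neg, [])

def parse_symbolic_py (expr : String) : Option String × Bool × String :=
  let modality : Option String := none
  let negated : Bool := false
  let rest : List Char := expr.toList
  let (negated, rest) := pvBangLoop negated rest
  let (modality, rest) :=
    match rest with
    | c :: r => if c = '#' ∨ c = '$' then (some (String.mk [c]), r) else (modality, c :: r)
    | [] => (modality, rest)
  let (negated, rest) := pvBangLoop negated rest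
  (modality, negated, String.mk rest)

-- ===== PORT B =====
-- B matches the whole prefix with the regex (!*)([#$]?)(!*)(.*) (DOTALL); on this
-- pattern the match is: a maximal run of '!', an optional single '#'/'$', a maximal
-- run of '!', and the remainder. negated = (|g1|+|g3|) % 2 == 1; empty g2 → none.
def parse_symbolic_py_alt (expr : String) : Option String × Bool × String :=
  let l := expr.toList
  let g1 := l.takeWhile (· = '!')
  let after1 := l.dropWhile (· = '!')
  let (g2, after2) :=
    match after1 with
    | c :: r => if c = '#' ∨ c = '$' then ([c], r) else (([] : List Char), after1)
    | [] => ([], after1)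
  let g3 := after2.takeWhile (· = '!')
  let g4 := after2.dropWhile (· = '!')
  let negated := (g1.length + g3.length) % 2 = 1
  ((if g2 = [] then none else some (String.mk g2)), negated, String.mk g4)

-- ===== PRECONDITION & SPEC =====
def Spec_parse_symbolic_py (expr : String) (out : Option String × Bool × String) : Prop := out = parse_symbolic_py_alt expr
instance (expr : String) (out : Option String × Bool × String) : Decidable (Spec_parse_symbolic_py expr out) := by unfold Spec_parse_symbolic_py; infer_instance

-- ===== CLAIM (what is proved, stated in full; the proofs are below) =====
def Claim_equal_parse_symbolic_py : Prop := ∀ (expr : String), Dom_parse_symbolic_py expr → Spec_parse_symbolic_py expr (parse_symbolic_py expr)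

-- ===== LEMMAS AND PROOFS =====

theorem pvBangLoop_eq (l : List Char) (neg : Bool) :
    pvBangLoop neg l =
      ((neg.xor (decide ((l.takeWhile (· = '!')).length % 2 = 1))), l.dropWhile (· = '!')) := by
  induction l generalizing neg with
  | nil => simp [pvBangLoop]
  | cons c r ih =>
    by_cases h : c = '!'
    · simp [pvBangLoop, h, ih, List.takeWhile, List.dropWhile, Nat.succ_mod_two_eq_one_iff]
      rcases Nat.mod_two_eq_zero_or_one (r.takeWhile (· = '!')).length with h2 | h2 <;>
        simp [h2]
    · simp [pvBangLoop, h, List.takeWhile, List.dropWhile]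

theorem parse_symbolic_py_spec : Claim_equal_parse_symbolic_py := by
  intro expr _
  unfold Spec_parse_symbolic_py parse_symbolic_py parse_symbolic_py_alt
  simp only [pvBangLoop_eq, Bool.false_xor]
  cases h1 : expr.toList.dropWhile (· = '!') with
  | nil => simp
  | cons c r =>
    by_cases h : c = '#' ∨ c = '$'
    · simp only [h, if_pos]
      simp [Bool.xor_comm]
      rcases Nat.mod_two_eq_zero_or_one (expr.toList.takeWhile (· = '!')).length with h2 | h2 <;>
      rcases Nat.mod_two_eq_zero_or_one (r.takeWhile (· = '!')).length with h3 | h3 <;>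
        simp [h2, h3, Nat.add_mod]
    · have hc : (c :: r).takeWhile (· = '!') = [] := by
        have := List.head?_dropWhile_not (p := (· = '!')) expr.toList
        rw [h1] at this; simp at this
        simp [List.takeWhile, this]
      have hd : (c :: r).dropWhile (· = '!') = c :: r := by
        have := List.head?_dropWhile_not (p := (· = '!')) expr.toList
        rw [h1] at this; simp at this
        simp [List.dropWhile, this]
      simp [h, hc, hd]
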